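-- pv_equiv track=rewrite | github.com/yunwei37/vllm-exp | bug-study/analysis_llm/check_analysis_completion.py | generate_todo_list
-- ===== SOURCE A (Python) =====
-- from typing import List, Tuple, Dict
--
-- def generate_todo_list(unfinished: List[Dict]) -> List[str]:
--     """Generate a prioritized todo list from unfinished analyses."""
--     todo_list = []
--
--     # Group by analysis type
--     grouped = {}
--     for item in unfinished:
--         parts = item['analysis_name'].split('/')
--         if len(parts) > 0:
--             framework = parts[0]
--             if framework not in grouped:
--                 grouped[framework] = []
--             grouped[framework].append(item)
--
--     # Prioritize by framework and type
--     priority_order = ['vllm', 'sglang', 'llama_cpp']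
--
--     for framework in priority_order:
--         if framework in grouped:
--             # Further prioritize by sampling method
--             label_based = []
--             other_methods = []
--
--             for item in grouped[framework]:
--                 if 'label_based' in item['analysis_name']:
--                     label_based.append(item)
--                 else:
--                     other_methods.append(item)
--
--             # Add label-based first
--             for item in sorted(label_based, key=lambda x: x['analysis_name']):
--                 todo_list.append(item['analysis_name'])
--
--             # Then other methods
--             for item in sorted(other_methods, key=lambda x: x['analysis_name']):
--                 todo_list.append(item['analysis_name'])
--
--     return todo_list
-- ===== SOURCE B (Python) =====
-- def generate_todo_list(unfinished):
--     """Generate a prioritized todo list from unfinished analyses."""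
--     rank = {'vllm': 0, 'sglang': 1, 'llama_cpp': 2}
--     kept = [item['analysis_name'] for item in unfinished
--             if item['analysis_name'].split('/')[0] in rank]
--     kept.sort(key=lambda n: (2 * rank[n.split('/')[0]] + (0 if 'label_based' in n else 1), n))
--     return kept
-- ===== Notes on version B (the rewrite author's own statement) =====
-- stated objective: simpler
-- what changed: Replaces the group-by dict plus per-framework label/other partitions and six sub-sorts with one filtering pass and a single stable sort under a composite (framework-rank*2+label-flag, name) key.
import Mathlib
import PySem

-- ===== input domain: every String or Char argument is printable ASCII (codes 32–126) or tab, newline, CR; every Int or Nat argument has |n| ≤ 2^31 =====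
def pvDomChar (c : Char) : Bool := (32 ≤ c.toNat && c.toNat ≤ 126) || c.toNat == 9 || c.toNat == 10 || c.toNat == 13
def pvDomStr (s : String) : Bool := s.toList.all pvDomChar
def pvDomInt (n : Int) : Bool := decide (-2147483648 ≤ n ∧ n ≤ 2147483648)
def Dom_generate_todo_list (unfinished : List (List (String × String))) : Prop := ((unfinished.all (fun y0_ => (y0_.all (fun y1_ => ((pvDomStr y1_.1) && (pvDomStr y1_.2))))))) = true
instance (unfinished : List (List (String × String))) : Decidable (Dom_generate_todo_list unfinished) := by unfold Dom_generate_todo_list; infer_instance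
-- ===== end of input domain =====

-- B replaces A's group-by dict, per-framework label/other partitions and six sub-sorts by one filter pass
-- and a single stable sort under a composite (2*framework-rank + label-flag, name) key; equal return values.

-- ===== PORT A =====
-- shared primitive helpers (each is one Python expression, used verbatim by both ports)
-- item['analysis_name']; Pre_ guarantees the key is present, so the "" default is never reached on admitted inputs
def pvName (item : List (String × String)) : String :=
  (PySem.Dict.mk item).getD "analysis_name" ""
-- n.split('/')[0]; the separator "/" is non-empty so split? is always `some`, and Python's split never returns []
def pvFw (n : String) : String :=
  ((PySem.Str.split? n "/").getD []).headD ""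
-- 'label_based' in n
def pvIsLab (n : String) : Bool := PySem.Str.isIn "label_based" n

def generate_todo_list (unfinished : List (List (String × String))) : List String :=
  let grouped : PySem.Dict String (List (List (String × String))) :=
    unfinished.foldl (fun g item =>
      let parts := (PySem.Str.split? (pvName item) "/").getD []
      if parts.length > 0 then
        g.modify (parts.headD "") [] (· ++ [item])
      else g) PySem.Dict.empty
  ["vllm", "sglang", "llama_cpp"].foldl (fun todo framework =>
    if grouped.contains framework then
      let p := (grouped.getD framework []).foldl
        (fun (p : List (List (String × String)) × List (List (String × String))) item =>
          if pvIsLab (pvName item) then (p.1 ++ [item], p.2) else (p.1, p.2 ++ [item])) ([], [])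
      let todo := (PySem.List.sorted p.1 pvName).foldl (fun t item => t ++ [pvName item]) todo
      (PySem.List.sorted p.2 pvName).foldl (fun t item => t ++ [pvName item]) todo
    else todo) []

-- ===== PORT B =====
def pvRank : PySem.Dict String Int :=
  PySem.Dict.ofList [("vllm", 0), ("sglang", 1), ("llama_cpp", 2)]
-- the composite sort key's first component: 2 * rank[n.split('/')[0]] + (0 if 'label_based' in n else 1)
def pvKey (n : String) : Int :=
  2 * pvRank.getD (pvFw n) 0 + (if pvIsLab n then 0 else 1)

def generate_todo_list_alt (unfinished : List (List (String × String))) : List String :=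
  let kept := (unfinished.filter (fun item => pvRank.contains (pvFw (pvName item)))).map pvName
  PySem.List.sorted2 kept pvKey (fun n => n)

-- ===== PRECONDITION & SPEC =====
-- Pre_ excludes exactly the inputs where some item lacks the 'analysis_name' key: there Python A raises KeyError.
def Pre_generate_todo_list (unfinished : List (List (String × String))) : Prop :=
  ∀ item ∈ unfinished, "analysis_name" ∈ item.map Prod.fst
instance (unfinished : List (List (String × String))) : Decidable (Pre_generate_todo_list unfinished) := by
  unfold Pre_generate_todo_list; infer_instance

def pvWitness_generate_todo_list : (List (List (String × String))) :=
  [[("analysis_name", "vllm/issues/label_based")], [("analysis_name", "sglang/prs/random")]]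

def Spec_generate_todo_list (unfinished : List (List (String × String))) (out : List String) : Prop := out = generate_todo_list_alt unfinished
instance (unfinished : List (List (String × String))) (out : List String) : Decidable (Spec_generate_todo_list unfinished out) := by unfold Spec_generate_todo_list; infer_instance

-- ===== CLAIM (what is proved, stated in full; the proofs are below) =====
def Claim_equal_generate_todo_list : Prop := ∀ (unfinished : List (List (String × String))), Dom_generate_todo_list unfinished → Pre_generate_todo_list unfinished → Spec_generate_todo_list unfinished (generate_todo_list unfinished)

-- ===== LEMMAS AND PROOFS =====

-- the lexicographic two-component comparison used by sorted2 is < under the Lex (Int × String) order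
theorem pvBefore_eq (k : String → Int) :
    (fun a b : String => decide (k a < k b) || (!decide (k b < k a) && decide (a < b)))
    = (fun a b : String => decide ((toLex (k a, a) : Lex (Int × String)) < toLex (k b, b))) := by
  funext a b
  by_cases h1 : k a < k b <;> by_cases h2 : k b < k a <;> by_cases h3 : a < b <;>
    simp [h1, h2, h3, Prod.Lex.lt_iff] <;> omega
theorem pvSorted2_eq_sorted_lex (l : List String) (k : String → Int) :
    PySem.List.sorted2 l k (fun n => n)
    = PySem.List.sorted l (fun n => (toLex (k n, n) : Lex (Int × String))) := by
  rw [PySem.List.sorted_eq_foldl_insertBy]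
  unfold PySem.List.sorted2
  simp only [if_neg (by decide : ¬(false = true))]
  rw [pvBefore_eq k]

-- splitting a list into its per-class filters (classes listed without repetition) is a permutation
theorem pvPerm_flatMap_filter (k : String → Int) :
    ∀ (cs : List Int), cs.Nodup → ∀ l : List String, (∀ n ∈ l, k n ∈ cs) →
      (cs.flatMap (fun c => l.filter (fun n => k n == c))).Perm l := by
  intro cs
  induction cs with
  | nil =>
    intro _ l hl
    cases l with
    | nil => simp
    | cons x t => exact absurd (hl x (by simp)) (by simp)
  | cons c cs ih =>
    intro hnd l hl
    have hcn : c ∉ cs := (List.nodup_cons.mp hnd).1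
    have hstep : cs.flatMap (fun c' => l.filter (fun n => k n == c'))
        = cs.flatMap (fun c' => (l.filter (fun n => !(k n == c))).filter (fun n => k n == c')) := by
      apply List.flatMap_congr
      intro c' hc'
      rw [List.filter_filter]
      apply List.filter_congr
      intro n hn
      by_cases h : k n = c'
      · have hne : k n ≠ c := by
          intro hc
          exact hcn (by rw [← hc, h] at hcn ⊢; exact hc')
        simp [h]
        omega
      · simp [h]
    have htail : ∀ n ∈ l.filter (fun n => !(k n == c)), k n ∈ cs := by
      intro n hn
      have h1 := List.of_mem_filter hn
      have h2 := hl n (List.mem_of_mem_filter hn)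
      simp at h1
      simpa [h1] using h2
    rw [List.flatMap_cons, hstep]
    exact (List.Perm.append_left _ (ih (List.nodup_cons.mp hnd).2 _ htail)).trans
      (List.filter_append_perm _ l)

-- concatenating the per-class sorted blocks in increasing class order is Lex-pairwise-ordered
theorem pvPairwise_flatMap (k : String → Int) :
    ∀ (cs : List Int), cs.Pairwise (· < ·) → ∀ l : List String,
      (cs.flatMap (fun c => PySem.List.sorted (l.filter (fun n => k n == c)) (fun n => n))).Pairwise
        (fun a b => (toLex (k a, a) : Lex (Int × String)) ≤ toLex (k b, b)) := by
  intro cs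
  induction cs with
  | nil => intro _ l; simp
  | cons c cs ih =>
    intro hp l
    rw [List.flatMap_cons]
    have hmemc : ∀ n ∈ PySem.List.sorted (l.filter (fun n => k n == c)) (fun n => n), k n = c := by
      intro n hn
      have := ((PySem.List.mem_sorted _ _ _ _).mp hn)
      have := List.of_mem_filter this
      simpa using this
    have hmemcs : ∀ n ∈ cs.flatMap (fun c => PySem.List.sorted (l.filter (fun n => k n == c)) (fun n => n)),
        ∃ c' ∈ cs, k n = c' := by
      intro n hn
      rcases List.mem_flatMap.mp hn with ⟨c', hc', hmem⟩
      exact ⟨c', hc', by simpa using List.of_mem_filter ((PySem.List.mem_sorted _ _ _ _).mp hmem)⟩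
    apply List.pairwise_append.mpr
    refine ⟨?_, ih (List.pairwise_cons.mp hp).2 l, ?_⟩
    · have hpw := PySem.List.sorted_pairwise (l.filter (fun n => k n == c)) (fun n => n)
      refine hpw.imp_of_mem ?_
      intro a b ha hb hab
      have hka := hmemc a ha
      have hkb := hmemc b hb
      rw [Prod.Lex.le_iff]
      right
      exact ⟨by simp [hka, hkb], by simpa using hab⟩
    · intro a ha b hb
      rcases hmemcs b hb with ⟨c', hc', hkb⟩
      have hka := hmemc a ha
      have hcc : c < c' := (List.pairwise_cons.mp hp).1 c' hc'
      rw [Prod.Lex.le_iff]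
      left
      simp [hka, hkb]
      omega

-- the stable composite-key sort equals the concatenation of the per-class name-sorted blocks
theorem pvSorted2_eq_flatMap (l : List String) (k : String → Int) (cs : List Int)
    (hp : cs.Pairwise (· < ·)) (hl : ∀ n ∈ l, k n ∈ cs) :
    PySem.List.sorted2 l k (fun n => n)
    = cs.flatMap (fun c => PySem.List.sorted (l.filter (fun n => k n == c)) (fun n => n)) := by
  rw [pvSorted2_eq_sorted_lex]
  apply PySem.List.eq_of_perm_of_pairwise_le_of_injective
    (key := fun n => (toLex (k n, n) : Lex (Int × String)))
  · intro a b h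
    exact congrArg (fun x => (ofLex x).2) h
  · refine (PySem.List.sorted_perm l _ false).trans ?_
    refine (pvPerm_flatMap_filter k cs hp.nodup l hl).symm.trans ?_
    exact (List.Perm.flatMap_left cs (fun c _ => (PySem.List.sorted_perm _ _ false).symm))
  · exact PySem.List.sorted_pairwise l _
  · exact pvPairwise_flatMap k cs hp l

-- A's grouping loop: the group of a non-empty framework name is the ordered sublist with that first segment
theorem pvGroupA (u : List (List (String × String))) :
    ∀ (d : PySem.Dict String (List (List (String × String)))) (c : String), c ≠ "" →
    (u.foldl (fun g item =>
      let parts := (PySem.Str.split? (pvName item) "/").getD []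
      if parts.length > 0 then
        g.modify (parts.headD "") [] (· ++ [item])
      else g) d).getD c []
    = d.getD c [] ++ u.filter (fun it => pvFw (pvName it) == c) := by
  induction u with
  | nil => intro d c _; simp
  | cons it t ih =>
    intro d c hc
    simp only [List.foldl_cons, List.filter_cons]
    by_cases h : ((PySem.Str.split? (pvName it) "/").getD []).length > 0
    · rw [if_pos h, ih _ c hc, PySem.Dict.getD_modify]
      by_cases he : ((PySem.Str.split? (pvName it) "/").getD []).head?.getD "" = c
      · have : pvFw (pvName it) == c := by simp [pvFw]; simpa using he
        simp [he, this, List.append_assoc]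
      · have : ¬ (pvFw (pvName it) == c) := by simp [pvFw]; simpa using he
        simp [this]
        intro hcc
        exact absurd hcc.symm he
    · rw [if_neg h, ih _ c hc]
      have hnil : (PySem.Str.split? (pvName it) "/").getD [] = [] := by
        cases hx : (PySem.Str.split? (pvName it) "/").getD [] with
        | nil => rfl
        | cons a b => rw [hx] at h; simp at h
      have : ¬ (pvFw (pvName it) == c) := by
        simp [pvFw, hnil]
        intro hx
        first | exact hc hx.symm | exact hc hx
      simp [this]


-- A's label/other partition loop is the pair of label/other filters
theorem pvPartA (l : List (List (String × String))) :
    ∀ (a b : List (List (String × String))),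
    l.foldl (fun (p : List (List (String × String)) × List (List (String × String))) item =>
        if pvIsLab (pvName item) then (p.1 ++ [item], p.2) else (p.1, p.2 ++ [item])) (a, b)
    = (a ++ l.filter (fun it => pvIsLab (pvName it)), b ++ l.filter (fun it => !pvIsLab (pvName it))) := by
  induction l with
  | nil => intro a b; simp
  | cons it t ih =>
    intro a b
    simp only [List.foldl_cons, List.filter_cons]
    by_cases h : pvIsLab (pvName it)
    · rw [if_pos h]; simp [ih, h, List.append_assoc]
    · rw [if_neg h]; simp [ih, h, List.append_assoc]


-- mapping a name-keyed stable sort through pvName is the identity-keyed sort of the names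
theorem pvMap_sorted (items : List (List (String × String))) :
    (PySem.List.sorted items pvName).map pvName
    = PySem.List.sorted (items.map pvName) (fun n => n) := by
  symm
  apply PySem.List.sorted_id_eq_of_perm_of_pairwise
  · exact (PySem.List.sorted_perm items pvName false).map pvName
  · exact List.pairwise_map.mpr (PySem.List.sorted_pairwise items pvName)

-- a filter whose predicate only looks at the name commutes with taking names
theorem pvMapFilter (u : List (List (String × String))) (q : String → Bool) :
    (u.filter (fun it => q (pvName it))).map pvName = (u.map pvName).filter q := by
  induction u with
  | nil => rfl
  | cons it t ih =>
    simp only [List.filter_cons, List.map_cons]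
    by_cases h : q (pvName it) <;> simp [h, ih]

-- A's per-framework branch, in terms of identity-keyed sorts of name lists
theorem pvStepA (u : List (List (String × String))) (todo : List String) (fw : String) (hfw : fw ≠ "") :
    (if (u.foldl (fun g item =>
          let parts := (PySem.Str.split? (pvName item) "/").getD []
          if parts.length > 0 then
            g.modify (parts.headD "") [] (· ++ [item])
          else g) PySem.Dict.empty).contains fw then
      (PySem.List.sorted
        (((u.foldl (fun g item =>
            let parts := (PySem.Str.split? (pvName item) "/").getD []
            if parts.length > 0 then
              g.modify (parts.headD "") [] (· ++ [item])
            else g) PySem.Dict.empty).getD fw []).foldl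
          (fun (p : List (List (String × String)) × List (List (String × String))) item =>
            if pvIsLab (pvName item) then (p.1 ++ [item], p.2) else (p.1, p.2 ++ [item])) ([], [])).2
        pvName).foldl (fun t item => t ++ [pvName item])
        ((PySem.List.sorted
          (((u.foldl (fun g item =>
              let parts := (PySem.Str.split? (pvName item) "/").getD []
              if parts.length > 0 then
                g.modify (parts.headD "") [] (· ++ [item])
              else g) PySem.Dict.empty).getD fw []).foldl
            (fun (p : List (List (String × String)) × List (List (String × String))) item =>
              if pvIsLab (pvName item) then (p.1 ++ [item], p.2) else (p.1, p.2 ++ [item])) ([], [])).1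
          pvName).foldl (fun t item => t ++ [pvName item]) todo)
    else todo)
    = todo ++ PySem.List.sorted ((u.map pvName).filter (fun n => pvFw n == fw && pvIsLab n == true)) (fun n => n)
           ++ PySem.List.sorted ((u.map pvName).filter (fun n => pvFw n == fw && pvIsLab n == false)) (fun n => n) := by
  have hget := pvGroupA u PySem.Dict.empty fw hfw
  rw [PySem.Dict.getD_empty] at hget
  rw [List.nil_append] at hget
  have hlabT : ∀ b : Bool, (u.map pvName).filter (fun n => pvFw n == fw && pvIsLab n == b)
      = ((u.filter (fun it => pvFw (pvName it) == fw)).filter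
          (fun it => pvIsLab (pvName it) == b)).map pvName := by
    intro b
    rw [← pvMapFilter u (fun n => pvFw n == fw && pvIsLab n == b), List.filter_filter]
    congr 1
    apply List.filter_congr
    intro it _
    cases hb : pvIsLab (pvName it) <;> cases b <;> simp [Bool.and_comm]
  by_cases hcont : (u.foldl (fun g item =>
      let parts := (PySem.Str.split? (pvName item) "/").getD []
      if parts.length > 0 then
        g.modify (parts.headD "") [] (· ++ [item])
      else g) PySem.Dict.empty).contains fw
  · rw [if_pos hcont, hget, pvPartA]
    simp only [List.nil_append]
    rw [PySem.List.foldl_append_singleton_eq_map, PySem.List.foldl_append_singleton_eq_map,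
      pvMap_sorted, pvMap_sorted, hlabT true, hlabT false]
    have hT : ∀ l : List (List (String × String)),
        l.filter (fun it => pvIsLab (pvName it)) = l.filter (fun it => pvIsLab (pvName it) == true) := by
      intro l
      apply List.filter_congr
      intro it _; cases pvIsLab (pvName it) <;> simp
    have hF : ∀ l : List (List (String × String)),
        l.filter (fun it => !pvIsLab (pvName it)) = l.filter (fun it => pvIsLab (pvName it) == false) := by
      intro l
      apply List.filter_congr
      intro it _; cases pvIsLab (pvName it) <;> simp
    rw [hT, hF, List.append_assoc]
  · rw [if_neg hcont]
    have hnil : u.filter (fun it => pvFw (pvName it) == fw) = [] := by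
      rw [← hget]
      exact PySem.Dict.getD_of_not_contains _ _ (Bool.eq_false_iff.mpr hcont)
    have hempty : ∀ b : Bool,
        (u.map pvName).filter (fun n => pvFw n == fw && pvIsLab n == b) = [] := by
      intro b
      rw [hlabT b, hnil]
      rfl
    rw [hempty true, hempty false]
    have hsn : (PySem.List.sorted ([] : List String) (fun n => n)) = [] := rfl
    rw [hsn]
    simp

theorem pvRank_eq : pvRank = ((PySem.Dict.empty.insert "vllm" 0).insert "sglang" 1).insert "llama_cpp" 2 := by rfl
theorem pvRank_contains (f : String) : pvRank.contains f = (f == "llama_cpp" || f == "sglang" || f == "vllm") := by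
  rw [pvRank_eq]
  simp [PySem.Dict.contains_insert, PySem.Dict.contains_empty, Bool.or_assoc]
theorem pvRank_getD (f : String) : pvRank.getD f 0 = (if f = "llama_cpp" then 2 else if f = "sglang" then 1 else if f = "vllm" then 0 else 0) := by
  rw [pvRank_eq]
  simp [PySem.Dict.getD_insert, PySem.Dict.getD_empty]
theorem pvClass0 (n : String) : ((pvKey n == (0:Int)) && pvRank.contains (pvFw n)) = ((pvFw n == "vllm") && (pvIsLab n == true)) := by
  by_cases h1 : pvFw n = "vllm" <;> by_cases h2 : pvFw n = "sglang" <;> by_cases h3 : pvFw n = "llama_cpp" <;> by_cases hl : pvIsLab n <;>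
    simp [pvKey, pvRank_getD, pvRank_contains, h1, h2, h3, hl]
theorem pvClass1 (n : String) : ((pvKey n == (1:Int)) && pvRank.contains (pvFw n)) = ((pvFw n == "vllm") && (pvIsLab n == false)) := by
  by_cases h1 : pvFw n = "vllm" <;> by_cases h2 : pvFw n = "sglang" <;> by_cases h3 : pvFw n = "llama_cpp" <;> by_cases hl : pvIsLab n <;>
    simp [pvKey, pvRank_getD, pvRank_contains, h1, h2, h3, hl]
theorem pvClass2 (n : String) : ((pvKey n == (2:Int)) && pvRank.contains (pvFw n)) = ((pvFw n == "sglang") && (pvIsLab n == true)) := by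
  by_cases h1 : pvFw n = "vllm" <;> by_cases h2 : pvFw n = "sglang" <;> by_cases h3 : pvFw n = "llama_cpp" <;> by_cases hl : pvIsLab n <;>
    simp [pvKey, pvRank_getD, pvRank_contains, h1, h2, h3, hl]
theorem pvClass3 (n : String) : ((pvKey n == (3:Int)) && pvRank.contains (pvFw n)) = ((pvFw n == "sglang") && (pvIsLab n == false)) := by
  by_cases h1 : pvFw n = "vllm" <;> by_cases h2 : pvFw n = "sglang" <;> by_cases h3 : pvFw n = "llama_cpp" <;> by_cases hl : pvIsLab n <;>
    simp [pvKey, pvRank_getD, pvRank_contains, h1, h2, h3, hl]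
theorem pvClass4 (n : String) : ((pvKey n == (4:Int)) && pvRank.contains (pvFw n)) = ((pvFw n == "llama_cpp") && (pvIsLab n == true)) := by
  by_cases h1 : pvFw n = "vllm" <;> by_cases h2 : pvFw n = "sglang" <;> by_cases h3 : pvFw n = "llama_cpp" <;> by_cases hl : pvIsLab n <;>
    simp [pvKey, pvRank_getD, pvRank_contains, h1, h2, h3, hl]
theorem pvClass5 (n : String) : ((pvKey n == (5:Int)) && pvRank.contains (pvFw n)) = ((pvFw n == "llama_cpp") && (pvIsLab n == false)) := by
  by_cases h1 : pvFw n = "vllm" <;> by_cases h2 : pvFw n = "sglang" <;> by_cases h3 : pvFw n = "llama_cpp" <;> by_cases hl : pvIsLab n <;>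
    simp [pvKey, pvRank_getD, pvRank_contains, h1, h2, h3, hl]

theorem generate_todo_list_eq (u : List (List (String × String))) :
    generate_todo_list u = generate_todo_list_alt u := by
  have hmem : ∀ n ∈ (u.map pvName).filter (fun n => pvRank.contains (pvFw n)),
      pvKey n ∈ ([0, 1, 2, 3, 4, 5] : List Int) := by
    intro n hn
    have hc0 := List.of_mem_filter hn
    rw [pvRank_contains] at hc0
    have hc : pvFw n = "vllm" ∨ pvFw n = "sglang" ∨ pvFw n = "llama_cpp" := by
      simp only [Bool.or_eq_true, beq_iff_eq] at hc0
      tauto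
    by_cases hl : pvIsLab n = true <;> rcases hc with h | h | h <;>
      simp [pvKey, pvRank_getD, h, hl]
  unfold generate_todo_list_alt
  rw [pvMapFilter u (fun n => pvRank.contains (pvFw n)),
    pvSorted2_eq_flatMap _ pvKey [0, 1, 2, 3, 4, 5] (by decide) hmem]
  unfold generate_todo_list
  simp only [List.foldl_cons, List.foldl_nil]
  rw [pvStepA u [] "vllm" (by decide), pvStepA u _ "sglang" (by decide),
    pvStepA u _ "llama_cpp" (by decide)]
  simp only [List.flatMap_cons, List.flatMap_nil, List.append_nil, List.nil_append,
    List.filter_filter, pvClass0, pvClass1, pvClass2, pvClass3, pvClass4, pvClass5,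
    List.append_assoc]

-- ===== VERDICT (by name: the statement is the Claim_ definition above) =====
theorem generate_todo_list_spec : Claim_equal_generate_todo_list := by
  intro u _ _
  unfold Spec_generate_todo_list
  exact generate_todo_list_eq u
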